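-- pv_equiv track=rewrite | github.com/IoannisBouzas/Complex-Data-Management | ex2/rtree.py | distribute_entries
-- ===== SOURCE A (Python) =====
-- import math
--
-- def distribute_entries(entries, node_capacity, min_entries):
--
--     if len(entries) <= node_capacity:
--         return [entries]
--
--     total_entries = len(entries)
--
--     num_nodes = math.ceil(total_entries / node_capacity)
--
--     last_node_entries = total_entries % node_capacity
--     if last_node_entries == 0:
--         last_node_entries = node_capacity
--
--     if last_node_entries < min_entries and num_nodes > 1:
--
--         entries_per_node = math.floor((total_entries - min_entries) / (num_nodes - 1))
--
--         if entries_per_node > node_capacity: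
--             nodes = []
--             for i in range(0, total_entries, node_capacity):
--                 end = min(i + node_capacity, total_entries)
--                 nodes.append(entries[i:end])
--             return nodes
--
--         nodes = []
--         start = 0
--         for i in range(num_nodes - 1):
--             end = start + entries_per_node
--             nodes.append(entries[start:end])
--             start = end
--
--         nodes.append(entries[start:])
--
--         return nodes
--     else:
--         nodes = []
--         for i in range(0, total_entries, node_capacity):
--             end = min(i + node_capacity, total_entries)
--             nodes.append(entries[i:end])
--         return nodes
-- ===== SOURCE B (Python) =====
-- def distribute_entries(entries, node_capacity, min_entries):
--     if len(entries) <= node_capacity: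
--         return [entries]
--     total = len(entries)
--     num_nodes = -(-total // node_capacity)
--     last = total % node_capacity
--     if last == 0:
--         last = node_capacity
--     if last < min_entries and num_nodes > 1:
--         per = (total - min_entries) // (num_nodes - 1)
--         if per <= node_capacity:
--             return [entries[i * per:(i + 1) * per] for i in range(num_nodes - 1)] \
--                    + [entries[(num_nodes - 1) * per:]]
--     return [entries[:node_capacity]] + distribute_entries(
--         entries[node_capacity:], node_capacity, min_entries)
-- ===== Notes on version B (the rewrite author's own statement) =====
-- stated objective: alternative
-- what changed: B replaces A's three iterative range/offset slicing loops by a recursive greedy formulation: it peels one full-capacity node off the front and recurses on the remaining suffix (the chunk sequence and its trailing remainder emerge from the recursion and the base case, with no node count or explicit offsets), while the rebalanced case becomes a direct indexed comprehension.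
-- outside the precondition, e.g. on distribute_entries([], -3, 1): A returns [], B raises RecursionError; on distribute_entries([1, 2, 3], -2, 1): A returns [], B raises RecursionError
import Mathlib
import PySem

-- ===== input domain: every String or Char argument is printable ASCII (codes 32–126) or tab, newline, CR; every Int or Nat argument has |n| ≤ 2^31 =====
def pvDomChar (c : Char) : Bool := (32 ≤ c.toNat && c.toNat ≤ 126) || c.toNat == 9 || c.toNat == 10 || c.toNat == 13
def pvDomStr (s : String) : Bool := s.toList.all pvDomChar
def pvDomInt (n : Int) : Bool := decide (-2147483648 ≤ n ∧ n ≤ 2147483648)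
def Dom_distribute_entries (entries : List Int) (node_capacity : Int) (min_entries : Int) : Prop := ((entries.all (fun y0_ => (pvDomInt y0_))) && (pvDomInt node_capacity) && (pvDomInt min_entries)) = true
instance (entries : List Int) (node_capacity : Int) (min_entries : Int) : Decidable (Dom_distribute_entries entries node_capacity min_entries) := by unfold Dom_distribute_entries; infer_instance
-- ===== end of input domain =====

-- B partitions by recursive greedy peeling (take one full node, recurse on the suffix) instead of A's three range loops; objective: alternative (return value only; both return the original list object when it fits in one node).


-- ===== PORT A =====
-- math.ceil(total/node_capacity) and math.floor(x/y) are ported as exact integer ceil/floor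
-- division (-((-a) // b) resp. a // b): exact on this domain (list lengths and |ints| ≤ 2^31,
-- far below the 2^53 float-exactness bound).
def distribute_entries (entries : List Int) (node_capacity : Int) (min_entries : Int) : List (List Int) :=
  if (entries.length : Int) ≤ node_capacity then [entries]
  else
    let total_entries : Int := entries.length
    let num_nodes : Int := -(PySem.Int.floordiv (-total_entries) node_capacity)
    let last0 : Int := PySem.Int.mod total_entries node_capacity
    let last_node_entries : Int := if last0 = 0 then node_capacity else last0
    if last_node_entries < min_entries ∧ num_nodes > 1 then
      let entries_per_node : Int := PySem.Int.floordiv (total_entries - min_entries) (num_nodes - 1)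
      if entries_per_node > node_capacity then
        (PySem.List.pyRange 0 total_entries node_capacity).foldl
          (fun nodes i =>
            nodes ++ [PySem.List.slice entries (some i) (some (min (i + node_capacity) total_entries))]) []
      else
        let st := (PySem.List.pyRange 0 (num_nodes - 1) 1).foldl
          (fun (st : List (List Int) × Int) _ =>
            (st.1 ++ [PySem.List.slice entries (some st.2) (some (st.2 + entries_per_node))],
             st.2 + entries_per_node)) ([], 0)
        st.1 ++ [PySem.List.slice entries (some st.2) none]
    else
      (PySem.List.pyRange 0 total_entries node_capacity).foldl
        (fun nodes i =>
          nodes ++ [PySem.List.slice entries (some i) (some (min (i + node_capacity) total_entries))]) []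

-- ===== PORT B =====
-- Source B's recursion is ported with a fuel parameter (entries.length) that merely makes the
-- recursion total; under Pre_ (node_capacity ≥ 1) the fuel is never exhausted.
def distribute_entries_alt_go (fuel : Nat) (xs : List Int) (node_capacity : Int) (min_entries : Int) : List (List Int) :=
  if (xs.length : Int) ≤ node_capacity then [xs]
  else
    let total : Int := xs.length
    let num_nodes : Int := -(PySem.Int.floordiv (-total) node_capacity)
    let last0 : Int := PySem.Int.mod total node_capacity
    let last : Int := if last0 = 0 then node_capacity else last0
    if last < min_entries ∧ num_nodes > 1 ∧
        PySem.Int.floordiv (total - min_entries) (num_nodes - 1) ≤ node_capacity then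
      let per : Int := PySem.Int.floordiv (total - min_entries) (num_nodes - 1)
      ((PySem.List.pyRange 0 (num_nodes - 1) 1).map
        (fun i => PySem.List.slice xs (some (i * per)) (some ((i + 1) * per))))
        ++ [PySem.List.slice xs (some ((num_nodes - 1) * per)) none]
    else
      match fuel with
      | 0 => []
      | fuel' + 1 =>
        PySem.List.slice xs none (some node_capacity)
          :: distribute_entries_alt_go fuel' (PySem.List.slice xs (some node_capacity) none)
              node_capacity min_entries

def distribute_entries_alt (entries : List Int) (node_capacity : Int) (min_entries : Int) : List (List Int) :=
  distribute_entries_alt_go entries.length entries node_capacity min_entries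

-- ===== PRECONDITION & SPEC =====
-- Pre_ restricts to the natural domain node_capacity ≥ 1: node_capacity = 0 makes A raise
-- ZeroDivisionError on any non-empty entries, and a non-positive capacity is outside the
-- function's natural domain (no partition into nodes of non-positive capacity is specified;
-- there A returns [] while B's recursion never terminates, see the cites).
def Pre_distribute_entries (entries : List Int) (node_capacity : Int) (min_entries : Int) : Prop :=
  1 ≤ node_capacity
instance (entries : List Int) (node_capacity : Int) (min_entries : Int) : Decidable (Pre_distribute_entries entries node_capacity min_entries) := by unfold Pre_distribute_entries; infer_instance

def pvWitness_distribute_entries : List Int × Int × Int := ([5, 1, 4, 2, 3], 2, 1)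

def Spec_distribute_entries (entries : List Int) (node_capacity : Int) (min_entries : Int) (out : List (List Int)) : Prop := out = distribute_entries_alt entries node_capacity min_entries
instance (entries : List Int) (node_capacity : Int) (min_entries : Int) (out : List (List Int)) : Decidable (Spec_distribute_entries entries node_capacity min_entries out) := by unfold Spec_distribute_entries; infer_instance

-- ===== CLAIM (what is proved, stated in full; the proofs are below) =====
def Claim_equal_distribute_entries : Prop := ∀ (entries : List Int) (node_capacity : Int) (min_entries : Int), Dom_distribute_entries entries node_capacity min_entries → Pre_distribute_entries entries node_capacity min_entries → Spec_distribute_entries entries node_capacity min_entries (distribute_entries entries node_capacity min_entries)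

-- ===== LEMMAS AND PROOFS =====

-- the balanced-branch condition of both programs, as a function of the length T only
def BalC (T node_capacity min_entries : Int) : Prop :=
  (if PySem.Int.mod T node_capacity = 0 then node_capacity else PySem.Int.mod T node_capacity) < min_entries ∧
  -(PySem.Int.floordiv (-T) node_capacity) > 1 ∧
  PySem.Int.floordiv (T - min_entries) (-(PySem.Int.floordiv (-T) node_capacity) - 1) ≤ node_capacity

-- the chunking both programs perform outside the balanced branch, in closed form
def chunks (c : Nat) (xs : List Int) : List (List Int) :=
  (List.range ((xs.length + c - 1) / c)).map (fun j => (xs.drop (c * j)).take c)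

-- one-step unfolding lemmas for B's recursion
lemma altGo_base (f : Nat) (xs : List Int) (cap mn : Int) (hlen : (xs.length : Int) ≤ cap) :
    distribute_entries_alt_go f xs cap mn = [xs] := by
  rw [distribute_entries_alt_go.eq_def, if_pos hlen]

lemma altGo_bal (f : Nat) (xs : List Int) (cap mn N per : Int)
    (hlen : ¬ ((xs.length : Int) ≤ cap))
    (hN : N = -(PySem.Int.floordiv (-(xs.length : Int)) cap))
    (hper : per = PySem.Int.floordiv ((xs.length : Int) - mn) (N - 1))
    (hb : BalC (xs.length : Int) cap mn) :
    distribute_entries_alt_go f xs cap mn =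
      ((PySem.List.pyRange 0 (N - 1) 1).map
        (fun i => PySem.List.slice xs (some (i * per)) (some ((i + 1) * per))))
        ++ [PySem.List.slice xs (some ((N - 1) * per)) none] := by
  subst hper; subst hN
  unfold BalC at hb
  rw [distribute_entries_alt_go.eq_def]
  dsimp only
  rw [if_neg hlen, if_pos hb]

lemma altGo_step (f : Nat) (xs : List Int) (cap mn : Int)
    (hlen : ¬ ((xs.length : Int) ≤ cap))
    (hb : ¬ BalC (xs.length : Int) cap mn) :
    distribute_entries_alt_go (f + 1) xs cap mn =
      PySem.List.slice xs none (some cap)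
        :: distribute_entries_alt_go f (PySem.List.slice xs (some cap) none) cap mn := by
  unfold BalC at hb
  rw [distribute_entries_alt_go.eq_def]
  dsimp only
  rw [if_neg hlen, if_neg hb]

lemma foldl_ignore {α β : Type} (l : List α) (g : β → β) (init : β) :
    l.foldl (fun st _ => g st) init = g^[l.length] init := by
  induction l generalizing init with
  | nil => rfl
  | cons x t ih => simp [List.foldl_cons, ih, Function.iterate_succ_apply]

lemma iter_spec (entries : List Int) (c : Int) (k : Nat) :
    (fun (st : List (List Int) × Int) =>
        (st.1 ++ [PySem.List.slice entries (some st.2) (some (st.2 + c))], st.2 + c))^[k] ([], 0)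
      = ((List.range k).map
            (fun j : Nat => PySem.List.slice entries (some (c * (j : Int))) (some (c * (j : Int) + c))), c * (k : Int)) := by
  induction k with
  | zero => simp
  | succ n ih =>
    rw [Function.iterate_succ_apply', ih]
    simp [List.range_succ, mul_add, add_comm]

-- A's balanced loop equals B's balanced comprehension
lemma bal_eq (entries : List Int) (N per : Int) (hN : 2 ≤ N) :
    (let st := (PySem.List.pyRange 0 (N - 1) 1).foldl
        (fun (st : List (List Int) × Int) _ =>
          (st.1 ++ [PySem.List.slice entries (some st.2) (some (st.2 + per))], st.2 + per)) ([], 0)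
     st.1 ++ [PySem.List.slice entries (some st.2) none])
    = ((PySem.List.pyRange 0 (N - 1) 1).map
        (fun i => PySem.List.slice entries (some (i * per)) (some ((i + 1) * per))))
        ++ [PySem.List.slice entries (some ((N - 1) * per)) none] := by
  have hlen : (PySem.List.pyRange 0 (N - 1) 1).length = (N - 1).toNat := by
    rw [PySem.List.length_pyRange_one]; congr 1; omega
  rw [foldl_ignore, hlen, iter_spec]
  have hc : ((N - 1).toNat : Int) = N - 1 := by omega
  dsimp only
  rw [hc, PySem.List.pyRange_one, List.map_map]
  congr 1
  · have hz : (N - 1 - 0).toNat = (N - 1).toNat := by omega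
    rw [hz]
    apply List.map_congr_left
    intro j _
    simp only [Function.comp_apply, zero_add]
    rw [show per * (j : Int) = (j : Int) * per from mul_comm _ _,
        show (j : Int) * per + per = ((j : Int) + 1) * per from by ring]
  · rw [mul_comm]

-- A's chunking loop computes `chunks` in closed form
lemma chunk_closed (xs : List Int) (cap N : Int) (hcap : 0 < cap) (hN2 : 2 ≤ N)
    (hb1 : (N - 1) * cap < (xs.length : Int)) (hb2 : (xs.length : Int) ≤ N * cap) :
    (PySem.List.pyRange 0 (xs.length : Int) cap).foldl
      (fun nodes i => nodes ++ [PySem.List.slice xs (some i) (some (min (i + cap) (xs.length : Int)))]) []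
    = chunks cap.toNat xs := by
  have hT : (0:Int) < (xs.length : Int) := by nlinarith
  have hdiv : ((xs.length : Int) - 0 + cap - 1) / cap = N := by
    rw [← PySem.Int.floordiv_eq_ediv_of_pos hcap]
    rw [PySem.Int.floordiv_eq_iff_of_pos hcap]
    constructor <;> nlinarith
  rw [PySem.List.foldl_append_singleton_eq_map, PySem.List.pyRange_of_pos _ _ hcap, hdiv, if_pos hT]
  set c : Nat := cap.toNat with hcdef
  have hc : (c : Int) = cap := Int.toNat_of_nonneg (le_of_lt hcap)
  unfold chunks
  have hcount : (xs.length + c - 1) / c = N.toNat := by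
    have hc1 : 1 ≤ c := by omega
    have h1 : N.toNat * c ≤ xs.length + c - 1 := by
      have h2 : (N:Int) * cap ≤ (xs.length : Int) + cap - 1 := by nlinarith
      have h3 : ((N.toNat * c : Nat) : Int) = N * cap := by push_cast; rw [hc]; congr 1; omega
      omega
    have h2 : xs.length + c - 1 < (N.toNat + 1) * c := by
      have h3 : (((N.toNat + 1) * c : Nat) : Int) = (N + 1) * cap := by push_cast; rw [hc]; congr 1; omega
      have h4 : (xs.length : Int) + cap - 1 < (N + 1) * cap := by nlinarith
      omega
    exact Nat.div_eq_of_lt_le h1 h2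
  rw [hcount, List.map_map]
  apply List.map_congr_left
  intro j hj
  simp only [Function.comp_apply, zero_add]
  have ha : (0:Int) ≤ cap * (j:Int) := by positivity
  have hb : (0:Int) ≤ min (cap * (j:Int) + cap) (xs.length : Int) := by
    apply le_min (by positivity) (by omega)
  rw [PySem.List.slice_toNat _ ha hb]
  have haN : (cap * (j:Int)).toNat = c * j := by
    have h5 : cap * (j:Int) = ((c * j : Nat) : Int) := by push_cast; rw [hc]
    rw [h5, Int.toNat_natCast]
  rw [haN]
  by_cases hend : cap * (j:Int) + cap ≤ (xs.length : Int)
  · rw [min_eq_left hend]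
    congr 1
    have h5 : cap * (j:Int) + cap = ((c * j + c : Nat) : Int) := by push_cast; rw [hc]
    rw [h5, Int.toNat_natCast]
    omega
  · rw [min_eq_right (by omega)]
    have hlen : (xs.drop (c * j)).length = xs.length - c * j := by
      simp [List.length_drop]
    have h1 : (xs.length : Int).toNat - c * j = xs.length - c * j := by omega
    rw [h1]
    have h2 : xs.length - c * j ≤ c := by
      have h6 : (xs.length : Int) < cap * (j:Int) + cap := by omega
      have h3 : ((c * j + c : Nat) : Int) = cap * (j:Int) + cap := by push_cast; rw [hc]
      omega
    rw [List.take_of_length_le (by omega), List.take_of_length_le (by omega)]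

lemma chunks_cons (c : Nat) (xs : List Int) (hc : 1 ≤ c) (hlen : c < xs.length) :
    chunks c xs = xs.take c :: chunks c (xs.drop c) := by
  unfold chunks
  rw [List.length_drop]
  have hdivs : (xs.length + c - 1) / c = ((xs.length - c) + c - 1) / c + 1 := by
    have h : xs.length + c - 1 = (xs.length - c + c - 1) + c := by omega
    rw [h, Nat.add_div_right _ (by omega)]
  rw [hdivs, List.range_succ_eq_map, List.map_cons, List.map_map]
  congr 1
  apply List.map_congr_left
  intro j _
  simp only [Function.comp_apply, List.drop_drop, Nat.succ_eq_add_one]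
  have h5 : c * (j + 1) = c + c * j := by ring
  rw [h5]

lemma chunks_singleton (c : Nat) (xs : List Int) (h1 : 1 ≤ xs.length) (h2 : xs.length ≤ c) :
    chunks c xs = [xs] := by
  unfold chunks
  have hcount : (xs.length + c - 1) / c = 1 := by
    apply Nat.div_eq_of_lt_le <;> omega
  rw [hcount]
  simp [List.take_of_length_le h2]

-- the balanced condition, false for xs, stays false for the peeled suffix
lemma balc_drop (T cap mn : Int) (hcap : 0 < cap) (h1 : cap < T) (h2 : cap < T - cap)
    (h : ¬ BalC T cap mn) : ¬ BalC (T - cap) cap mn := by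
  intro hb
  apply h
  unfold BalC at hb ⊢
  set N : Int := -(PySem.Int.floordiv (-T) cap) with hNdef
  have hbounds : (N - 1) * cap < T ∧ T ≤ N * cap :=
    (PySem.Int.neg_floordiv_neg_eq_iff_of_pos hcap).mp hNdef.symm
  have hN2 : 2 ≤ N := by
    by_contra hcon
    have hN1 : N ≤ 1 := by omega
    have : N * cap ≤ 1 * cap := mul_le_mul_of_nonneg_right hN1 (le_of_lt hcap)
    omega
  have hN' : -(PySem.Int.floordiv (-(T - cap)) cap) = N - 1 := by
    rw [PySem.Int.neg_floordiv_neg_eq_iff_of_pos hcap]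
    constructor <;> nlinarith [hbounds.1, hbounds.2]
  rw [hN'] at hb
  have hmodeq : PySem.Int.mod (T - cap) cap = PySem.Int.mod T cap := by
    rw [PySem.Int.mod_eq_emod_of_pos hcap, PySem.Int.mod_eq_emod_of_pos hcap]
    have h5 : T - cap = T + cap * (-1) := by ring
    rw [h5, Int.add_mul_emod_self_left]
  rw [hmodeq] at hb
  obtain ⟨hb1, hb2, hb3⟩ := hb
  refine ⟨hb1, by omega, ?_⟩
  -- per ≤ cap follows from per' ≤ cap (contrapositive of per > cap ⇒ per' > cap)
  by_contra hper
  rw [not_le] at hper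
  have hN3 : 2 < N := by omega
  have hq : (cap + 1) * (N - 1) ≤ T - mn :=
    (PySem.Int.le_floordiv_iff_mul_le (by omega)).mp (by omega)
  have hq' : (cap + 1) * (N - 1 - 1) ≤ T - cap - mn := by nlinarith
  have := (PySem.Int.le_floordiv_iff_mul_le (by omega)).mpr hq'
  omega

-- B's recursion computes `chunks` whenever the balanced branch never fires
lemma altGo_chunks (cap mn : Int) (hcap : 1 ≤ cap) :
    ∀ (fuel : Nat) (xs : List Int), xs.length ≤ fuel → cap < (xs.length : Int) →
      ¬ BalC (xs.length : Int) cap mn →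
      distribute_entries_alt_go fuel xs cap mn = chunks cap.toNat xs := by
  intro fuel
  induction fuel with
  | zero =>
    intro xs hfuel hlen _
    omega
  | succ f ih =>
    intro xs hfuel hlen hbal
    rw [altGo_step f xs cap mn (by omega) hbal]
    have hslice_to : PySem.List.slice xs none (some cap) = xs.take cap.toNat :=
      PySem.List.slice_to xs (by omega)
    have hslice_from : PySem.List.slice xs (some cap) none = xs.drop cap.toNat :=
      PySem.List.slice_from xs (by omega)
    rw [hslice_to, hslice_from]
    have hclen : cap.toNat < xs.length := by omega
    have hdroplen : (xs.drop cap.toNat).length = xs.length - cap.toNat := by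
      simp [List.length_drop]
    rw [chunks_cons cap.toNat xs (by omega) hclen]
    congr 1
    by_cases hrest : ((xs.drop cap.toNat).length : Int) ≤ cap
    · rw [altGo_base f _ cap mn hrest, chunks_singleton cap.toNat _ (by omega) (by omega)]
    · rw [not_le] at hrest
      have hbal' : ¬ BalC ((xs.drop cap.toNat).length : Int) cap mn := by
        have heq : ((xs.drop cap.toNat).length : Int) = (xs.length : Int) - cap := by
          rw [hdroplen]; omega
        rw [heq]
        exact balc_drop _ cap mn (by omega) hlen (by omega) hbal
      exact ih _ (by omega) hrest hbal'

theorem distribute_entries_spec : Claim_equal_distribute_entries := by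
  intro entries cap mn _ hcap
  unfold Pre_distribute_entries at hcap
  unfold Spec_distribute_entries distribute_entries distribute_entries_alt
  by_cases hle : (entries.length : Int) ≤ cap
  · rw [if_pos hle, altGo_base _ _ _ _ hle]
  · rw [if_neg hle]
    dsimp only
    have hcap0 : (0:Int) < cap := by omega
    set T : Int := (entries.length : Int) with hT
    set N : Int := -(PySem.Int.floordiv (-T) cap) with hNdef
    set r : Int := PySem.Int.mod T cap with hrdef
    set last : Int := if r = 0 then cap else r with hlast
    have hbounds : (N - 1) * cap < T ∧ T ≤ N * cap :=
      (PySem.Int.neg_floordiv_neg_eq_iff_of_pos hcap0).mp hNdef.symm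
    have hN2 : 2 ≤ N := by
      by_contra h
      have hN1 : N ≤ 1 := by omega
      have h6 : N * cap ≤ 1 * cap :=
        mul_le_mul_of_nonneg_right hN1 (le_of_lt hcap0)
      have : T ≤ cap := by linarith [hbounds.2]
      omega
    by_cases hbal : BalC T cap mn
    · obtain ⟨hc1, hc2, hc3⟩ := hbal
      rw [if_pos (show last < mn ∧ N > 1 from ⟨hc1, hc2⟩)]
      rw [if_neg (not_lt.mpr hc3)]
      rw [altGo_bal entries.length entries cap mn N _ hle hNdef rfl ⟨hc1, hc2, hc3⟩]
      exact bal_eq entries N (PySem.Int.floordiv (T - mn) (N - 1)) hN2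
    · rw [altGo_chunks cap mn (by omega) entries.length entries (le_refl _) (by omega) hbal]
      by_cases h1 : last < mn ∧ N > 1
      · rw [if_pos h1]
        have hper : ¬ PySem.Int.floordiv (T - mn) (N - 1) ≤ cap := fun h => hbal ⟨h1.1, h1.2, h⟩
        rw [if_pos (lt_of_not_ge hper)]
        exact chunk_closed entries cap N hcap0 hN2 hbounds.1 hbounds.2
      · rw [if_neg h1]
        exact chunk_closed entries cap N hcap0 hN2 hbounds.1 hbounds.2
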